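-- pv_equiv track=rewrite | github.com/Wintergatan/Tightinator | test3.py | replace_negatives_with_neighbors
-- ===== SOURCE A (Python) =====
-- def replace_negatives_with_neighbors(lst):
--     new_lst = lst.copy()  # Create a copy of the original list
--     for i in range(len(lst)):
--         if lst[i] < 0:
--             # Find the nearest non-negative neighbors
--             left_neighbor = next((x for x in reversed(lst[:i]) if x >= 0), None)
--             right_neighbor = next((x for x in lst[i:] if x >= 0), None)
--
--             # Replace negative value with the nearest neighbor
--             if left_neighbor is not None and right_neighbor is not None:
--                 if abs(lst[i] - left_neighbor) <= abs(lst[i] - right_neighbor):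
--                     new_lst[i] = left_neighbor
--                 else:
--                     new_lst[i] = right_neighbor
--             elif left_neighbor is not None:
--                 new_lst[i] = left_neighbor
--             elif right_neighbor is not None:
--                 new_lst[i] = right_neighbor
--     return new_lst
-- ===== SOURCE B (Python) =====
-- def replace_negatives_with_neighbors(lst):
--     if not lst or min(lst) >= 0:
--         return lst.copy()  # nothing to replace
--     n = len(lst)
--     # one forward pass: nearest non-negative value strictly to the left of each index
--     lefts = []
--     last = None
--     for x in lst:
--         lefts.append(last)
--         if x >= 0:
--             last = x
--     # one backward pass: nearest non-negative value at or after each index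
--     rights = [None] * n
--     nxt = None
--     for i in range(n - 1, -1, -1):
--         if lst[i] >= 0:
--             nxt = lst[i]
--         rights[i] = nxt
--     # combine
--     out = []
--     for v, l, r in zip(lst, lefts, rights):
--         if v >= 0:
--             out.append(v)
--         elif l is not None and r is not None:
--             out.append(l if abs(v - l) <= abs(v - r) else r)
--         elif l is not None:
--             out.append(l)
--         elif r is not None:
--             out.append(r)
--         else:
--             out.append(v)
--     return out
-- ===== Notes on version B (the rewrite author's own statement) =====
-- stated objective: faster
-- what changed: Replaces the per-negative-element rescans of the prefix and suffix with a trivial early return when no element is negative and otherwise one forward pass caching the nearest non-negative value on the left plus one backward pass caching it on the right, combined in a single zip, O(n) total.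
import Mathlib
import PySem

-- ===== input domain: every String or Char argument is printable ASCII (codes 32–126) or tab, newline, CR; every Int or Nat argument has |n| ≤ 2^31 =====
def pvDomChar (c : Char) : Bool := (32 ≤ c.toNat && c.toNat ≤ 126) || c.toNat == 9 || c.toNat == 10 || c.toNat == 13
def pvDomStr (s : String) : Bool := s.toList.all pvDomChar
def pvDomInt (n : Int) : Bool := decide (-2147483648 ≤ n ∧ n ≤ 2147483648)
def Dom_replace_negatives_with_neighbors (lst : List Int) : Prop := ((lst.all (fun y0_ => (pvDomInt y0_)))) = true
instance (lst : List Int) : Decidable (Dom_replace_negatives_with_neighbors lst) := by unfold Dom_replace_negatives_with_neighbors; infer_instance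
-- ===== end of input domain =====

-- B replaces A's per-negative-element rescans of the prefix and suffix with one forward and one backward pass plus a zip.

-- ===== PORT A =====
-- lst[:i] / lst[i:] with 0 ≤ i ≤ len are exactly List.take / List.drop;
-- next((x for x in … if x >= 0), None) is List.find?; lst[i] with i in range(len) is lst.getD i 0.
def replace_negatives_with_neighbors (lst : List Int) : List Int :=
  (List.range lst.length).foldl (fun new_lst i =>
    if lst.getD i 0 < 0 then
      let left := ((lst.take i).reverse).find? (fun x => decide (0 ≤ x))
      let right := (lst.drop i).find? (fun x => decide (0 ≤ x))
      match left, right with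
      | some l, some r =>
          if (lst.getD i 0 - l).natAbs ≤ (lst.getD i 0 - r).natAbs then new_lst.set i l
          else new_lst.set i r
      | some l, none => new_lst.set i l
      | none, some r => new_lst.set i r
      | none, none => new_lst
    else new_lst) lst

-- ===== PORT B =====
-- forward pass of Source B: lefts[i] = nearest non-negative strictly left of i (None if absent)
def pvLefts : List Int → Option Int → List (Option Int)
  | [], _ => []
  | x :: xs, last => last :: pvLefts xs (if 0 ≤ x then some x else last)

-- backward pass of Source B: rights[i] = nearest non-negative at or after i (None if absent)
def pvRights : List Int → List (Option Int)
  | [] => []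
  | x :: xs =>
    let rest := pvRights xs
    (if 0 ≤ x then some x else rest.headD none) :: rest

-- the combining loop body of Source B
def pvCombine (v : Int) (l r : Option Int) : Int :=
  if 0 ≤ v then v
  else match l, r with
    | some a, some b => if (v - a).natAbs ≤ (v - b).natAbs then a else b
    | some a, none => a
    | none, some b => b
    | none, none => v

-- `not lst or min(lst) >= 0` of Source B: empty list, or the minimum is non-negative
def replace_negatives_with_neighbors_alt (lst : List Int) : List Int :=
  if lst.isEmpty || decide (0 ≤ lst.min?.getD 0) then lst
  else (lst.zip ((pvLefts lst none).zip (pvRights lst))).map (fun p => pvCombine p.1 p.2.1 p.2.2)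

-- ===== PRECONDITION & SPEC =====
def Spec_replace_negatives_with_neighbors (lst : List Int) (out : List Int) : Prop := out = replace_negatives_with_neighbors_alt lst
instance (lst : List Int) (out : List Int) : Decidable (Spec_replace_negatives_with_neighbors lst out) := by unfold Spec_replace_negatives_with_neighbors; infer_instance

-- ===== CLAIM (what is proved, stated in full; the proofs are below) =====
def Claim_equal_replace_negatives_with_neighbors : Prop := ∀ (lst : List Int), Dom_replace_negatives_with_neighbors lst → Spec_replace_negatives_with_neighbors lst (replace_negatives_with_neighbors lst)

-- ===== LEMMAS AND PROOFS =====

-- A's loop body, named for the proofs (definitionally the lambda in the port)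
def pvStepA (lst : List Int) (new_lst : List Int) (i : Nat) : List Int :=
  if lst.getD i 0 < 0 then
    let left := ((lst.take i).reverse).find? (fun x => decide (0 ≤ x))
    let right := (lst.drop i).find? (fun x => decide (0 ≤ x))
    match left, right with
    | some l, some r =>
        if (lst.getD i 0 - l).natAbs ≤ (lst.getD i 0 - r).natAbs then new_lst.set i l
        else new_lst.set i r
    | some l, none => new_lst.set i l
    | none, some r => new_lst.set i r
    | none, none => new_lst
  else new_lst

-- the value A writes at index j (none = no write)
def pvValA (lst : List Int) (j : Nat) : Option Int :=
  match ((lst.take j).reverse).find? (fun x => decide (0 ≤ x)), (lst.drop j).find? (fun x => decide (0 ≤ x)) with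
  | some l, some r => some (if (lst.getD j 0 - l).natAbs ≤ (lst.getD j 0 - r).natAbs then l else r)
  | some l, none => some l
  | none, some r => some r
  | none, none => none

lemma pvStepA_eq (lst new_lst : List Int) (i : Nat) :
    pvStepA lst new_lst i =
      if lst.getD i 0 < 0 then
        (match pvValA lst i with
         | some v => new_lst.set i v
         | none => new_lst)
      else new_lst := by
  unfold pvStepA pvValA
  split
  · cases ((lst.take i).reverse).find? (fun x => decide (0 ≤ x)) <;>
      cases (lst.drop i).find? (fun x => decide (0 ≤ x)) <;>
      simp <;> try (split <;> rfl)
  · rfl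

lemma pvFoldA (lst : List Int) : ∀ (k : Nat), k ≤ lst.length → ∀ (acc : List Int), acc.length = lst.length →
    ((List.range k).foldl (pvStepA lst) acc).length = lst.length ∧
    ∀ j : Nat, ((List.range k).foldl (pvStepA lst) acc)[j]? =
      (if j < k ∧ lst.getD j 0 < 0 then pvValA lst j else none).or acc[j]? := by
  intro k
  induction k with
  | zero =>
    intro _ acc hacc
    refine ⟨by simpa using hacc, fun j => by simp⟩
  | succ k ih =>
    intro hk acc hacc
    have hk' : k ≤ lst.length := Nat.le_of_succ_le hk
    obtain ⟨hlen, hget⟩ := ih hk' acc hacc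
    rw [List.range_succ, List.foldl_append, List.foldl_cons, List.foldl_nil, pvStepA_eq]
    by_cases hneg : lst.getD k 0 < 0
    · cases hv : pvValA lst k with
      | none =>
        simp only [if_pos hneg]
        refine ⟨hlen, fun j => ?_⟩
        rw [hget j]
        congr 1
        by_cases hj : j = k
        · rw [hj, if_neg (fun h => absurd h.1 (lt_irrefl k)),
            if_pos ⟨Nat.lt_succ_self k, hneg⟩, hv]
        · have hc : (j < k + 1 ∧ lst.getD j 0 < 0) ↔ (j < k ∧ lst.getD j 0 < 0) :=
            and_congr_left' (by omega)
          rw [if_congr hc rfl rfl]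
      | some v =>
        simp only [if_pos hneg]
        refine ⟨by rw [List.length_set, hlen], fun j => ?_⟩
        rw [List.getElem?_set]
        by_cases hj : k = j
        · have hklt : k < ((List.range k).foldl (pvStepA lst) acc).length := by
            rw [hlen]; omega
          rw [if_pos hj, if_pos hklt, ← hj, if_pos ⟨Nat.lt_succ_self k, hneg⟩, hv]
          rfl
        · rw [if_neg hj, hget j]
          congr 1
          have hc : (j < k + 1 ∧ lst.getD j 0 < 0) ↔ (j < k ∧ lst.getD j 0 < 0) :=
            and_congr_left' (by omega)
          rw [if_congr hc rfl rfl]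
    · simp only [if_neg hneg]
      refine ⟨hlen, fun j => ?_⟩
      rw [hget j]
      congr 1
      by_cases hj : j = k
      · subst hj
        rw [if_neg (by rintro ⟨-, h⟩; exact hneg h), if_neg (by rintro ⟨-, h⟩; exact hneg h)]
      · have hc : (j < k + 1 ∧ lst.getD j 0 < 0) ↔ (j < k ∧ lst.getD j 0 < 0) :=
          and_congr_left' (by omega)
        rw [if_congr hc rfl rfl]

lemma pvLefts_length (xs : List Int) : ∀ last, (pvLefts xs last).length = xs.length := by
  induction xs with
  | nil => intro last; simp [pvLefts]
  | cons x xs ih => intro last; simp [pvLefts, ih]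

lemma pvRights_length (xs : List Int) : (pvRights xs).length = xs.length := by
  induction xs with
  | nil => simp [pvRights]
  | cons x xs ih => simp [pvRights, ih]

lemma pvLefts_get (xs : List Int) : ∀ (last : Option Int) (j : Nat),
    (pvLefts xs last)[j]? =
      if j < xs.length then some ((((xs.take j).reverse).find? (fun x => decide (0 ≤ x))).or last)
      else none := by
  induction xs with
  | nil => intro last j; simp [pvLefts]
  | cons x xs ih =>
    intro last j
    cases j with
    | zero => simp [pvLefts]
    | succ j =>
      simp only [pvLefts, List.getElem?_cons_succ, ih, List.length_cons,
        Nat.succ_lt_succ_iff, List.take_succ_cons, List.reverse_cons, List.find?_append]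
      split
      · have hx : ((List.find? (fun x => decide (0 ≤ x)) [x]).or last) =
            if 0 ≤ x then some x else last := by
          by_cases hx : (0:Int) ≤ x <;> simp [hx]
        rw [Option.or_assoc, hx]
      · rfl

lemma pvRights_get (xs : List Int) : ∀ (j : Nat),
    (pvRights xs)[j]? =
      if j < xs.length then some ((xs.drop j).find? (fun x => decide (0 ≤ x)))
      else none := by
  induction xs with
  | nil => intro j; simp [pvRights]
  | cons x xs ih =>
    intro j
    cases j with
    | zero =>
      have hhead : (pvRights xs).head?.getD none = xs.find? (fun x => decide (0 ≤ x)) := by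
        cases xs with
        | nil => simp [pvRights]
        | cons y ys =>
          rw [List.head?_eq_getElem?, ih 0]
          simp
      by_cases hx : (0:Int) ≤ x <;>
        simp [pvRights, hx, hhead, List.headD_eq_head?_getD]
    | succ j => simp [pvRights, ih j]

lemma pvZip_getElem?_some {α β : Type} (l : List α) (m : List β) (j : Nat) (a : α) (b : β)
    (ha : l[j]? = some a) (hb : m[j]? = some b) : (l.zip m)[j]? = some (a, b) := by
  obtain ⟨h1, ha'⟩ := List.getElem?_eq_some_iff.mp ha
  obtain ⟨h2, hb'⟩ := List.getElem?_eq_some_iff.mp hb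
  rw [List.getElem?_eq_getElem (by simp [List.length_zip]; omega)]
  simp [List.getElem_zip, ha', hb']

-- ===== VERDICT (by name: the statement is the Claim_ definition above) =====
theorem replace_negatives_with_neighbors_spec : Claim_equal_replace_negatives_with_neighbors := by
  intro lst _
  unfold Spec_replace_negatives_with_neighbors
  have hA : replace_negatives_with_neighbors lst = (List.range lst.length).foldl (pvStepA lst) lst := rfl
  obtain ⟨hlen, hget⟩ := pvFoldA lst lst.length le_rfl lst rfl
  unfold replace_negatives_with_neighbors_alt
  by_cases hall : (lst.isEmpty || decide (0 ≤ lst.min?.getD 0)) = true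
  · rw [if_pos hall]
    apply List.ext_getElem?
    intro j
    rw [hA, hget j]
    have hno : ¬ (j < lst.length ∧ lst.getD j 0 < 0) := by
      rintro ⟨hj, hneg⟩
      have hgetD : lst.getD j 0 = lst[j] := by
        rw [List.getD_eq_getElem?_getD, List.getElem?_eq_getElem hj]; rfl
      rw [hgetD] at hneg
      cases hmin : lst.min? with
      | none =>
        have : lst = [] := List.min?_eq_none_iff.mp hmin
        rw [this] at hj; simp at hj
      | some m =>
        have hne : lst.isEmpty = false := by
          rcases lst with - | - <;> simp_all
        rw [hne, hmin] at hall
        simp at hall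
        have := (List.le_min?_iff hmin).mp le_rfl lst[j] (List.getElem_mem hj)
        omega
    rw [if_neg hno]
    rfl
  · rw [if_neg hall]
    apply List.ext_getElem?
    intro j
    rw [hA, hget j]
    by_cases hj : j < lst.length
    · have hlst : lst[j]? = some lst[j] := List.getElem?_eq_getElem hj
      have hgetD : lst.getD j 0 = lst[j] := by rw [List.getD_eq_getElem?_getD, hlst]; rfl
      have hL : (pvLefts lst none)[j]? =
          some ((((lst.take j).reverse).find? (fun x => decide (0 ≤ x))).or none) := by
        rw [pvLefts_get lst none j, if_pos hj]
      have hR : (pvRights lst)[j]? = some ((lst.drop j).find? (fun x => decide (0 ≤ x))) := by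
        rw [pvRights_get lst j, if_pos hj]
      have hzip := pvZip_getElem?_some lst ((pvLefts lst none).zip (pvRights lst)) j lst[j] _
        hlst (pvZip_getElem?_some _ _ j _ _ hL hR)
      rw [List.getElem?_map, hzip]
      simp only [Option.map_some, Option.or_none]
      unfold pvValA pvCombine
      rw [hgetD, hlst]
      by_cases hv : lst[j] < 0
      · have hnv : ¬ (0 ≤ lst[j]) := by omega
        cases hl : ((lst.take j).reverse).find? (fun x => decide (0 ≤ x)) <;>
          cases hr : (lst.drop j).find? (fun x => decide (0 ≤ x)) <;>
          simp [hv, hj, hnv]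
      · have hnv : (0 ≤ lst[j]) := by omega
        simp [hv, hnv]
    · have hnone : lst[j]? = none := List.getElem?_eq_none (by omega)
      have hbnone : ((lst.zip ((pvLefts lst none).zip (pvRights lst))).map
          (fun p => pvCombine p.1 p.2.1 p.2.2))[j]? = none := by
        apply List.getElem?_eq_none
        simp only [List.length_map, List.length_zip, pvLefts_length, pvRights_length]
        omega
      rw [hbnone, hnone]
      simp [hj]
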